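-- pv_equiv track=rewrite | github.com/afeefebrahim/anand-python | chap2/ex7.py | cumilative_sum
-- ===== SOURCE A (Python) =====
-- def cumilative_sum(num):
--
--    u=[]
--    for i in range(0,len(num)):
--       r=0
--       s=0
--       while r <= i:
--         s=s+num[r]
--         r=r+1
--       u.insert(i,s)
--    return u
-- ===== SOURCE B (Python) =====
-- def cumilative_sum(num):
--     u = []
--     s = 0
--     for x in num:
--         s += x
--         u.append(s)
--     return u
-- ===== Notes on version B (the rewrite author's own statement) =====
-- stated objective: faster
-- what changed: Replaced the quadratic re-summation (inner while loop recomputing each prefix from scratch) by a single pass that maintains a running sum.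
import Mathlib
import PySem

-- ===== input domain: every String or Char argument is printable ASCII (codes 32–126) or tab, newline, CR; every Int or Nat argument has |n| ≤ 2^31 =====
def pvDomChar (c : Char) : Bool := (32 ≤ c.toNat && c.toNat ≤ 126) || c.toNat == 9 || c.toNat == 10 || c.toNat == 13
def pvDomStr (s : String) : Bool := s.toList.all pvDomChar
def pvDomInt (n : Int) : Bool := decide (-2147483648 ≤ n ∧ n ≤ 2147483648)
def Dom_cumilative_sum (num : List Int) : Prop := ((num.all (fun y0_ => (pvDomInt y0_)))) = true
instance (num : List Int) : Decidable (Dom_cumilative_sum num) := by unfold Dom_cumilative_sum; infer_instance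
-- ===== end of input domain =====

-- B replaces A's quadratic inner re-summation by one pass with a running sum (measured faster).

-- ===== PORT A =====
-- inner 'while r <= i: s = s + num[r]; r = r + 1' loop of A
def pvALoop (num : List Int) (i r s : Int) : Int :=
  if _h : r ≤ i then pvALoop num i (r + 1) (s + PySem.List.pyGetD num r 0) else s
termination_by (i + 1 - r).toNat
decreasing_by omega

def cumilative_sum (num : List Int) : List Int :=
  (PySem.List.pyRange 0 (num.length : Int) 1).foldl
    (fun u i => PySem.List.insert u i (pvALoop num i 0 0)) []

-- ===== PORT B =====
def cumilative_sum_alt (num : List Int) : List Int :=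
  (num.foldl (fun (acc : List Int × Int) x => (acc.1 ++ [acc.2 + x], acc.2 + x)) ([], 0)).1

-- ===== PRECONDITION & SPEC =====
def Spec_cumilative_sum (num : List Int) (out : List Int) : Prop := out = cumilative_sum_alt num
instance (num : List Int) (out : List Int) : Decidable (Spec_cumilative_sum num out) := by unfold Spec_cumilative_sum; infer_instance

-- ===== CLAIM (what is proved, stated in full; the proofs are below) =====
def Claim_equal_cumilative_sum : Prop := ∀ (num : List Int), Dom_cumilative_sum num → Spec_cumilative_sum num (cumilative_sum num)

-- ===== LEMMAS AND PROOFS =====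

lemma getD_add_drop_sum (num : List Int) (m r : Nat) (hr : r < m) :
    num.getD r 0 + ((num.take m).drop (r + 1)).sum = ((num.take m).drop r).sum := by
  by_cases h : r < num.length
  · have hlt : r < (num.take m).length := by simp [List.length_take]; omega
    rw [List.getD_eq_getElem _ _ h]
    rw [List.drop_eq_getElem_cons hlt, List.sum_cons, List.getElem_take]
  · have hd : (num.take m).length ≤ r := by simp [List.length_take]; omega
    rw [List.getD_eq_default _ _ (by omega), List.drop_eq_nil_of_le (by omega),
        List.drop_eq_nil_of_le hd]
    simp

lemma aLoop_eq : ∀ (n : Nat) (num : List Int) (i r s : Int), (i + 1 - r).toNat ≤ n → 0 ≤ r →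
    pvALoop num i r s = s + ((num.take (i + 1).toNat).drop r.toNat).sum := by
  intro n
  induction n with
  | zero =>
    intro num i r s hn hr
    rw [pvALoop]
    have h : ¬ r ≤ i := by omega
    have hd : (num.take (i + 1).toNat).length ≤ r.toNat := by
      simp [List.length_take]; omega
    rw [List.drop_eq_nil_of_le hd]
    simp [h]
  | succ n ih =>
    intro num i r s hn hr
    rw [pvALoop]
    by_cases h : r ≤ i
    · simp only [h, dif_pos]
      rw [ih num i (r + 1) _ (by omega) (by omega)]
      have hr' : r = ((r.toNat : Nat) : Int) := by omega
      rw [hr', PySem.List.pyGetD_natCast]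
      have h1 : ((r.toNat : Int) + 1).toNat = r.toNat + 1 := by omega
      rw [h1, add_assoc, getD_add_drop_sum num _ r.toNat (by omega), Int.toNat_natCast]
    · have hd : (num.take (i + 1).toNat).length ≤ r.toNat := by
        simp [List.length_take]; omega
      rw [List.drop_eq_nil_of_le hd]
      simp [h]

lemma afold (num : List Int) (n : Nat) : ∀ (a b : Int) (u : List Int),
    (b - a).toNat = n → 0 ≤ a → (u.length : Int) = a →
    (PySem.List.pyRange a b 1).foldl
      (fun u i => PySem.List.insert u i (pvALoop num i 0 0)) u
      = u ++ (List.range n).map (fun (k : Nat) => pvALoop num (a + (k : Int)) 0 0) := by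
  induction n with
  | zero =>
    intro a b u hn ha hu
    rw [PySem.List.pyRange_one_eq_nil (by omega)]
    simp
  | succ n ih =>
    intro a b u hn ha hu
    rw [PySem.List.pyRange_one_cons (by omega : a < b)]
    simp only [List.foldl_cons]
    have hins : PySem.List.insert u a (pvALoop num a 0 0) = u ++ [pvALoop num a 0 0] := by
      rw [← hu]
      simpa using PySem.List.insert_len u (pvALoop num (↑u.length) 0 0)
    rw [hins, ih (a + 1) b _ (by omega) (by omega) (by simp; omega)]
    rw [List.range_succ_eq_map, List.map_cons, List.map_map, List.append_assoc]
    congr 1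
    rw [List.singleton_append]
    congr 1
    · simp
    · apply List.map_congr_left
      intro k _
      simp only [Function.comp_apply]
      congr 1
      push_cast
      ring

lemma bfold (xs : List Int) : ∀ (u : List Int) (s : Int),
    (xs.foldl (fun (acc : List Int × Int) x => (acc.1 ++ [acc.2 + x], acc.2 + x)) (u, s)).1
      = u ++ (List.range xs.length).map (fun k => s + (xs.take (k + 1)).sum) := by
  induction xs with
  | nil => simp
  | cons x xs ih =>
    intro u s
    simp only [List.foldl_cons]
    rw [ih]
    rw [List.length_cons, List.range_succ_eq_map, List.map_cons, List.map_map,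
      List.append_assoc]
    congr 1
    rw [List.singleton_append]
    congr 1
    · simp
    · apply List.map_congr_left
      intro k _
      simp only [Function.comp_apply, List.take_succ_cons, List.sum_cons]
      ring

-- ===== VERDICT (by name: the statement is the Claim_ definition above) =====
theorem cumilative_sum_spec : Claim_equal_cumilative_sum := by
  intro num _
  unfold Spec_cumilative_sum cumilative_sum cumilative_sum_alt
  rw [afold num num.length 0 (num.length : Int) [] (by omega) le_rfl (by simp), bfold]
  simp only [List.nil_append]
  apply List.map_congr_left
  intro k hk
  rw [aLoop_eq ((0 : Int) + (k : Int) + 1).toNat num _ 0 0 le_rfl le_rfl]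
  simp
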